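-- pv_equiv track=rewrite | github.com/MeteoSwiss-APN/pyflexplot | src/pyflexplot/input/meta_data.py | _format_unit
-- ===== SOURCE A (Python) =====
-- def _format_unit(s: str) -> str:
--     """Auto-format the unit by elevating superscripts etc."""
--     s = str(s)
--     old_new = [
--         ("m-2", "m$^{-2}$"),
--         ("m-3", "m$^{-3}$"),
--         ("s-1", "s$^{-1}$"),
--     ]
--     for old, new in old_new:
--         s = s.replace(old, new)
--     return s
-- ===== SOURCE B (Python) =====
-- def _format_unit(s: str) -> str:
--     """Auto-format the unit by elevating superscripts etc."""
--     s = str(s)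
--     mapping = {
--         "m-2": "m$^{-2}$",
--         "m-3": "m$^{-3}$",
--         "s-1": "s$^{-1}$",
--     }
--     out = []
--     i = 0
--     n = len(s)
--     while i < n:
--         rep = mapping.get(s[i:i + 3])
--         if rep is not None:
--             out.append(rep)
--             i += 3
--         else:
--             out.append(s[i])
--             i += 1
--     return "".join(out)
-- ===== Notes on version B (the rewrite author's own statement) =====
-- stated objective: alternative
-- what changed: A runs three whole-string replace passes (one per pattern); B makes a single left-to-right pass over the string, looking up the next three characters in a dict and emitting either the replacement (advancing by 3) or the character (advancing by 1).
import Mathlib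
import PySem

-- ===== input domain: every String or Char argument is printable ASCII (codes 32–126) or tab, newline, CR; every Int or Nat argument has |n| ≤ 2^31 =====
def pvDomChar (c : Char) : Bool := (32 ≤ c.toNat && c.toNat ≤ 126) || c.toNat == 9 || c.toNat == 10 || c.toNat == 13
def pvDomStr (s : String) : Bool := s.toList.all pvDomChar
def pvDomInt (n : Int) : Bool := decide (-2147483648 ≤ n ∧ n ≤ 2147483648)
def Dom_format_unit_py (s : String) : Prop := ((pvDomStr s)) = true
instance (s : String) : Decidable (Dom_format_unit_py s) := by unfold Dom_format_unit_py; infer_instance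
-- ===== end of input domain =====

-- B replaces A's three whole-string replace passes by a single left-to-right pass
-- with a 3-entry table keyed by the next three characters (objective: alternative).

-- ===== PORT A =====
def format_unit_py (s : String) : String :=
  let old_new : List (String × String) :=
    [("m-2", "m$^{-2}$"), ("m-3", "m$^{-3}$"), ("s-1", "s$^{-1}$")]
  old_new.foldl (fun s p => PySem.Str.replace s p.1 p.2) s

-- ===== PORT B =====
-- Source B's dict `mapping`
def pvMapping : PySem.Dict (List Char) (List Char) :=
  PySem.Dict.mk
    [("m-2".toList, "m$^{-2}$".toList),
     ("m-3".toList, "m$^{-3}$".toList),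
     ("s-1".toList, "s$^{-1}$".toList)]

-- Source B's while loop over the index i, ported as recursion on the remaining
-- suffix s[i:]; the slice s[i:i+3] is `take 3` of that suffix, i += 3 / i += 1
-- drop the consumed characters, and joining the appended pieces is `++`.
def pvScan : List Char → List Char
  | [] => []
  | c :: t =>
    match pvMapping.get? ((c :: t).take 3) with
    | some rep => rep ++ pvScan (t.drop 2)
    | none => c :: pvScan t
termination_by l => l.length
decreasing_by all_goals simp

def format_unit_py_alt (s : String) : String := String.ofList (pvScan s.toList)

-- ===== PRECONDITION & SPEC =====
def Spec_format_unit_py (s : String) (out : String) : Prop := out = format_unit_py_alt s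
instance (s : String) (out : String) : Decidable (Spec_format_unit_py s out) := by unfold Spec_format_unit_py; infer_instance

-- ===== CLAIM (what is proved, stated in full; the proofs are below) =====
def Claim_equal_format_unit_py : Prop := ∀ (s : String), Dom_format_unit_py s → Spec_format_unit_py s (format_unit_py s)

-- ===== LEMMAS AND PROOFS =====

-- Natural structural recursion computing Python's str.replace for a nonempty pattern.
def pvRepl (old new : List Char) : List Char → List Char
  | [] => []
  | c :: t =>
    if old.isPrefixOf (c :: t) then new ++ pvRepl old new (t.drop (old.length - 1))
    else c :: pvRepl old new t
termination_by l => l.length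
decreasing_by all_goals simp

theorem pvGo_spec (old new : List Char) (h : old ≠ []) :
    ∀ (fuel : Nat) (l acc : List Char), l.length ≤ fuel →
      PySem.Chars.replace.go old new fuel l acc = acc.reverse ++ pvRepl old new l := by
  intro fuel
  induction fuel with
  | zero =>
    intro l acc hl
    rw [List.length_eq_zero_iff.mp (Nat.le_zero.mp hl)]
    simp [PySem.Chars.replace.go, pvRepl]
  | succ n ih =>
    intro l acc hl
    match l with
    | [] => simp [PySem.Chars.replace.go, pvRepl]
    | c :: t =>
      have h1 : 1 ≤ old.length := List.length_pos_iff.mpr h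
      rw [PySem.Chars.replace.go]
      by_cases hp : old.isPrefixOf (c :: t)
      · have hd : List.drop old.length (c :: t) = t.drop (old.length - 1) := by
          cases old with
          | nil => exact absurd rfl h
          | cons o os => simp
        rw [if_pos hp, ih _ _ (by simp at hl ⊢; omega), pvRepl, if_pos hp, hd]
        simp
      · rw [if_neg hp, ih _ _ (by simp at hl ⊢; omega), pvRepl, if_neg hp]
        simp

theorem pvReplace_eq (l old new : List Char) (h : old ≠ []) :
    PySem.Chars.replace l old new = pvRepl old new l := by
  rw [PySem.Chars.replace, if_neg (by simp [h]), pvGo_spec old new h l.length l [] le_rfl]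
  simp

theorem pvRepl_cons_not (old new : List Char) (c : Char) (t : List Char)
    (hp : ¬ old.isPrefixOf (c :: t) = true) :
    pvRepl old new (c :: t) = c :: pvRepl old new t := by
  rw [pvRepl, if_neg hp]

theorem pvRepl_cons_match (old new : List Char) (c : Char) (t : List Char)
    (hp : old.isPrefixOf (c :: t) = true) :
    pvRepl old new (c :: t) = new ++ pvRepl old new (t.drop (old.length - 1)) := by
  rw [pvRepl, if_pos hp]

theorem pvRepl_cons_ne (ph : Char) (pt new : List Char) (c : Char) (t : List Char)
    (hne : c ≠ ph) :
    pvRepl (ph :: pt) new (c :: t) = c :: pvRepl (ph :: pt) new t := by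
  apply pvRepl_cons_not
  intro h
  exact hne ((List.cons_prefix_cons.mp (List.isPrefixOf_iff_prefix.mp h)).1).symm

theorem pvRepl_head? (ph : Char) (pt nt : List Char) (t : List Char) :
    (pvRepl (ph :: pt) (ph :: nt) t).head? = t.head? := by
  cases t with
  | nil => simp [pvRepl]
  | cons c t =>
    rw [pvRepl]
    by_cases hp : (ph :: pt).isPrefixOf (c :: t)
    · have hc : ph = c := (List.cons_prefix_cons.mp (List.isPrefixOf_iff_prefix.mp hp)).1
      rw [if_pos hp]
      simp [hc]
    · rw [if_neg hp]
      simp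

-- A pattern [a,'-',e] that does not occur at the head of c :: t does not occur at
-- the head of c :: F t either, for any F that preserves heads and passes '-' through.
theorem pvNonmatch (a e : Char) (F : List Char → List Char)
    (hhead : ∀ w, (F w).head? = w.head?)
    (hcons : ∀ u, F ('-' :: u) = '-' :: F u)
    (c : Char) (t : List Char)
    (h : ¬ [a, '-', e] <+: c :: t) : ¬ [a, '-', e] <+: c :: F t := by
  intro hpre
  obtain ⟨hc, h2⟩ := List.cons_prefix_cons.mp hpre
  have hFt : (F t).head? = some '-' := by
    obtain ⟨r, hr⟩ := h2
    rw [← hr]; rfl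
  rw [hhead] at hFt
  obtain ⟨u, rfl⟩ : ∃ u, t = '-' :: u := by
    cases t with
    | nil => simp at hFt
    | cons d u => exact ⟨u, by simp at hFt; rw [hFt]⟩
  rw [hcons] at h2
  have h3 : [e] <+: F u := (List.cons_prefix_cons.mp h2).2
  have hFu : (F u).head? = some e := by
    obtain ⟨r, hr⟩ := h3
    rw [← hr]; rfl
  rw [hhead] at hFu
  obtain ⟨v, rfl⟩ : ∃ v, u = e :: v := by
    cases u with
    | nil => simp at hFu
    | cons d v => exact ⟨v, by simp at hFu; rw [hFu]⟩
  exact h ⟨v, by simp [hc]⟩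

-- pass-through of the emitted replacement texts (no pattern matches inside them
-- or spanning out of them: the second character '$' kills every alignment)
theorem pvPass_n2_m3 (X : List Char) :
    pvRepl ['m','-','3'] ['m','$','^','{','-','3','}','$']
        (['m','$','^','{','-','2','}','$'] ++ X)
      = ['m','$','^','{','-','2','}','$'] ++
        pvRepl ['m','-','3'] ['m','$','^','{','-','3','}','$'] X := by
  simp [pvRepl, List.isPrefixOf]

theorem pvPass_n2_s1 (X : List Char) :
    pvRepl ['s','-','1'] ['s','$','^','{','-','1','}','$']
        (['m','$','^','{','-','2','}','$'] ++ X)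
      = ['m','$','^','{','-','2','}','$'] ++
        pvRepl ['s','-','1'] ['s','$','^','{','-','1','}','$'] X := by
  simp [pvRepl, List.isPrefixOf]

theorem pvPass_n3_s1 (X : List Char) :
    pvRepl ['s','-','1'] ['s','$','^','{','-','1','}','$']
        (['m','$','^','{','-','3','}','$'] ++ X)
      = ['m','$','^','{','-','3','}','$'] ++
        pvRepl ['s','-','1'] ['s','$','^','{','-','1','}','$'] X := by
  simp [pvRepl, List.isPrefixOf]

theorem pvGet2 : pvMapping.get? ['m','-','2'] = some ['m','$','^','{','-','2','}','$'] := by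
  decide

theorem pvGet3 : pvMapping.get? ['m','-','3'] = some ['m','$','^','{','-','3','}','$'] := by
  decide

theorem pvGet1 : pvMapping.get? ['s','-','1'] = some ['s','$','^','{','-','1','}','$'] := by
  decide

theorem pvKey : ∀ (n : Nat) (l : List Char), l.length ≤ n →
    pvRepl ['s','-','1'] ['s','$','^','{','-','1','}','$']
      (pvRepl ['m','-','3'] ['m','$','^','{','-','3','}','$']
        (pvRepl ['m','-','2'] ['m','$','^','{','-','2','}','$'] l)) = pvScan l := by
  intro n
  induction n with
  | zero =>
    intro l hl
    rw [List.length_eq_zero_iff.mp (Nat.le_zero.mp hl)]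
    simp [pvRepl, pvScan]
  | succ n ih =>
    intro l hl
    match l with
    | [] => simp [pvRepl, pvScan]
    | c :: t =>
      by_cases hp2 : (['m','-','2'] : List Char).isPrefixOf (c :: t)
      · obtain ⟨u, hu⟩ := List.isPrefixOf_iff_prefix.mp hp2
        obtain ⟨rfl, rfl⟩ : c = 'm' ∧ t = '-' :: '2' :: u := by
          simp at hu
          exact ⟨hu.1.symm, hu.2.symm⟩
        rw [pvRepl_cons_match ['m','-','2'] _ 'm' ('-' :: '2' :: u) hp2]
        rw [show List.drop ((['m','-','2'] : List Char).length - 1) ('-' :: '2' :: u) = u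
            from rfl]
        rw [pvPass_n2_m3, pvPass_n2_s1, ih u (by simp at hl; omega)]
        rw [pvScan, show List.take 3 ('m' :: '-' :: '2' :: u) = ['m','-','2'] from rfl, pvGet2]
        rfl
      · by_cases hp3 : (['m','-','3'] : List Char).isPrefixOf (c :: t)
        · obtain ⟨u, hu⟩ := List.isPrefixOf_iff_prefix.mp hp3
          obtain ⟨rfl, rfl⟩ : c = 'm' ∧ t = '-' :: '3' :: u := by
            simp at hu
            exact ⟨hu.1.symm, hu.2.symm⟩
          rw [pvRepl_cons_not ['m','-','2'] _ 'm' ('-' :: '3' :: u) hp2,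
              pvRepl_cons_not ['m','-','2'] _ '-' ('3' :: u) (by simp [List.isPrefixOf]),
              pvRepl_cons_not ['m','-','2'] _ '3' u (by simp [List.isPrefixOf])]
          rw [pvRepl_cons_match ['m','-','3'] _ 'm'
              ('-' :: '3' :: pvRepl ['m','-','2'] ['m','$','^','{','-','2','}','$'] u)
              (by simp [List.isPrefixOf])]
          rw [show List.drop ((['m','-','3'] : List Char).length - 1)
                ('-' :: '3' :: pvRepl ['m','-','2'] ['m','$','^','{','-','2','}','$'] u)
              = pvRepl ['m','-','2'] ['m','$','^','{','-','2','}','$'] u from rfl]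
          rw [pvPass_n3_s1, ih u (by simp at hl; omega)]
          rw [pvScan, show List.take 3 ('m' :: '-' :: '3' :: u) = ['m','-','3'] from rfl,
              pvGet3]
          rfl
        · by_cases hp1 : (['s','-','1'] : List Char).isPrefixOf (c :: t)
          · obtain ⟨u, hu⟩ := List.isPrefixOf_iff_prefix.mp hp1
            obtain ⟨rfl, rfl⟩ : c = 's' ∧ t = '-' :: '1' :: u := by
              simp at hu
              exact ⟨hu.1.symm, hu.2.symm⟩
            rw [pvRepl_cons_ne 'm' ['-','2'] _ 's' ('-' :: '1' :: u) (by decide),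
                pvRepl_cons_ne 'm' ['-','2'] _ '-' ('1' :: u) (by decide),
                pvRepl_cons_ne 'm' ['-','2'] _ '1' u (by decide)]
            rw [pvRepl_cons_ne 'm' ['-','3'] _ 's'
                  ('-' :: '1' :: pvRepl ['m','-','2'] ['m','$','^','{','-','2','}','$'] u)
                  (by decide),
                pvRepl_cons_ne 'm' ['-','3'] _ '-'
                  ('1' :: pvRepl ['m','-','2'] ['m','$','^','{','-','2','}','$'] u) (by decide),
                pvRepl_cons_ne 'm' ['-','3'] _ '1'
                  (pvRepl ['m','-','2'] ['m','$','^','{','-','2','}','$'] u) (by decide)]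
            rw [pvRepl_cons_match ['s','-','1'] _ 's'
                ('-' :: '1' :: pvRepl ['m','-','3'] ['m','$','^','{','-','3','}','$']
                  (pvRepl ['m','-','2'] ['m','$','^','{','-','2','}','$'] u))
                (by simp [List.isPrefixOf])]
            rw [show List.drop ((['s','-','1'] : List Char).length - 1)
                  ('-' :: '1' :: pvRepl ['m','-','3'] ['m','$','^','{','-','3','}','$']
                    (pvRepl ['m','-','2'] ['m','$','^','{','-','2','}','$'] u))
                = pvRepl ['m','-','3'] ['m','$','^','{','-','3','}','$']
                    (pvRepl ['m','-','2'] ['m','$','^','{','-','2','}','$'] u) from rfl]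
            rw [ih u (by simp at hl; omega)]
            rw [pvScan, show List.take 3 ('s' :: '-' :: '1' :: u) = ['s','-','1'] from rfl,
                pvGet1]
            rfl
          · -- default: none of the three patterns occurs at this position
            have hF1head : ∀ w, (pvRepl ['m','-','2'] ['m','$','^','{','-','2','}','$'] w).head?
                = w.head? :=
              fun w => pvRepl_head? 'm' ['-','2'] ['$','^','{','-','2','}','$'] w
            have hF1cons : ∀ u, pvRepl ['m','-','2'] ['m','$','^','{','-','2','}','$'] ('-' :: u)
                = '-' :: pvRepl ['m','-','2'] ['m','$','^','{','-','2','}','$'] u :=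
              fun u => pvRepl_cons_ne _ _ _ _ _ (by decide)
            have hF2head : ∀ w, (pvRepl ['m','-','3'] ['m','$','^','{','-','3','}','$']
                (pvRepl ['m','-','2'] ['m','$','^','{','-','2','}','$'] w)).head? = w.head? := by
              intro w
              rw [pvRepl_head? 'm' ['-','3'] ['$','^','{','-','3','}','$'], hF1head]
            have hF2cons : ∀ u, pvRepl ['m','-','3'] ['m','$','^','{','-','3','}','$']
                  (pvRepl ['m','-','2'] ['m','$','^','{','-','2','}','$'] ('-' :: u))
                = '-' :: pvRepl ['m','-','3'] ['m','$','^','{','-','3','}','$']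
                  (pvRepl ['m','-','2'] ['m','$','^','{','-','2','}','$'] u) := by
              intro u
              rw [hF1cons]
              exact pvRepl_cons_ne _ _ _ _ _ (by decide)
            have hq3 : ¬ (['m','-','3'] : List Char).isPrefixOf
                (c :: pvRepl ['m','-','2'] ['m','$','^','{','-','2','}','$'] t) = true := by
              intro h
              exact pvNonmatch 'm' '3' _ hF1head hF1cons c t
                (fun hh => hp3 (List.isPrefixOf_iff_prefix.mpr hh))
                (List.isPrefixOf_iff_prefix.mp h)
            have hq1 : ¬ (['s','-','1'] : List Char).isPrefixOf
                (c :: pvRepl ['m','-','3'] ['m','$','^','{','-','3','}','$']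
                  (pvRepl ['m','-','2'] ['m','$','^','{','-','2','}','$'] t)) = true := by
              intro h
              exact pvNonmatch 's' '1' _ hF2head hF2cons c t
                (fun hh => hp1 (List.isPrefixOf_iff_prefix.mpr hh))
                (List.isPrefixOf_iff_prefix.mp h)
            rw [pvRepl_cons_not _ _ _ _ hp2, pvRepl_cons_not _ _ _ _ hq3,
                pvRepl_cons_not _ _ _ _ hq1, ih t (by simp at hl; omega)]
            -- the scan takes its default branch: the 3-character window is no key
            have hk2 : ¬ List.take 3 (c :: t) = ['m','-','2'] := fun h =>
              hp2 (List.isPrefixOf_iff_prefix.mpr (h ▸ List.take_prefix 3 (c :: t)))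
            have hk3 : ¬ List.take 3 (c :: t) = ['m','-','3'] := fun h =>
              hp3 (List.isPrefixOf_iff_prefix.mpr (h ▸ List.take_prefix 3 (c :: t)))
            have hk1 : ¬ List.take 3 (c :: t) = ['s','-','1'] := fun h =>
              hp1 (List.isPrefixOf_iff_prefix.mpr (h ▸ List.take_prefix 3 (c :: t)))
            have hget : pvMapping.get? ((c :: t).take 3) = none := by
              have g2 : (('m' == c) && ((['-','2'] : List Char) == List.take 2 t)) = false := by
                refine Bool.eq_false_iff.mpr ?_
                intro hcon
                rw [Bool.and_eq_true] at hcon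
                exact hk2 (by
                  rw [show List.take 3 (c :: t) = c :: List.take 2 t from rfl,
                      ← eq_of_beq hcon.1, ← eq_of_beq hcon.2])
              have g3 : (('m' == c) && ((['-','3'] : List Char) == List.take 2 t)) = false := by
                refine Bool.eq_false_iff.mpr ?_
                intro hcon
                rw [Bool.and_eq_true] at hcon
                exact hk3 (by
                  rw [show List.take 3 (c :: t) = c :: List.take 2 t from rfl,
                      ← eq_of_beq hcon.1, ← eq_of_beq hcon.2])
              have g1 : (('s' == c) && ((['-','1'] : List Char) == List.take 2 t)) = false := by
                refine Bool.eq_false_iff.mpr ?_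
                intro hcon
                rw [Bool.and_eq_true] at hcon
                exact hk1 (by
                  rw [show List.take 3 (c :: t) = c :: List.take 2 t from rfl,
                      ← eq_of_beq hcon.1, ← eq_of_beq hcon.2])
              simp [pvMapping, PySem.Dict.get?, List.find?, g2, g3, g1]
            rw [pvScan, hget]

-- ===== VERDICT (by name: the statement is the Claim_ definition above) =====
theorem format_unit_py_spec : Claim_equal_format_unit_py := by
  intro s _
  unfold Spec_format_unit_py format_unit_py format_unit_py_alt
  simp only [List.foldl]
  simp only [PySem.Str.replace, String.toList_ofList]
  rw [pvReplace_eq _ _ _ (by decide), pvReplace_eq _ _ _ (by decide),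
      pvReplace_eq _ _ _ (by decide)]
  rw [show ("m-2" : String).toList = ['m','-','2'] from by decide,
      show ("m-3" : String).toList = ['m','-','3'] from by decide,
      show ("s-1" : String).toList = ['s','-','1'] from by decide,
      show ("m$^{-2}$" : String).toList = ['m','$','^','{','-','2','}','$'] from by decide,
      show ("m$^{-3}$" : String).toList = ['m','$','^','{','-','3','}','$'] from by decide,
      show ("s$^{-1}$" : String).toList = ['s','$','^','{','-','1','}','$'] from by decide]
  rw [pvKey s.toList.length s.toList le_rfl]
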